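-- pv_equiv track=rewrite | github.com/anhvt2/leetcode | 2561-rearranging-fruits-v2.py | balance_sums
-- ===== SOURCE A (Python) =====
-- from typing import List, Tuple
-- from collections import defaultdict
--
-- def balance_sums(
--     b1: List[int],
--     b2: List[int]
-- ) -> Tuple[List[int], List[int]]:
--     sum1, sum2 = sum(b1), sum(b2)
--     diff = sum1 - sum2
--     # If diff is odd, no single‐swap solution exists
--     if diff % 2 != 0:
--         return b1, b2
--
--     # We need a - b = diff//2
--     target = diff // 2
--
--     # Build a map from value in b2 to its indices
--     pos2 = defaultdict(list)
--     for j, val in enumerate(b2):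
--         pos2[val].append(j)
--
--     # Find the first a in b1 such that (a - target) exists in b2
--     for i, a in enumerate(b1):
--         b = a - target
--         if pos2[b]:
--             j = pos2[b][0]
--             # swap
--             b1[i], b2[j] = b2[j], b1[i]
--             return b1, b2
--
--     # no single‐swap solution found
--     return b1, b2
-- ===== SOURCE B (Python) =====
-- from typing import List, Tuple
--
-- def balance_sums(
--     b1: List[int],
--     b2: List[int]
-- ) -> Tuple[List[int], List[int]]:
--     diff = sum(b1) - sum(b2)
--     # If diff is odd, no single-swap solution exists
--     if diff % 2 != 0:
--         return b1, b2
--     target = diff // 2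
--     # Plain nested scan: first i in b1, then first j in b2 with a - b == target
--     for i, a in enumerate(b1):
--         for j, b in enumerate(b2):
--             if a - b == target:
--                 b1[i], b2[j] = b2[j], b1[i]
--                 return b1, b2
--     return b1, b2
-- ===== Notes on version B (the rewrite author's own statement) =====
-- stated objective: simpler
-- what changed: Replaces A's defaultdict value-to-indices table plus lookup pass with a direct nested scan over b1 and b2 that finds the first qualifying pair and swaps in place.
import Mathlib
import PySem

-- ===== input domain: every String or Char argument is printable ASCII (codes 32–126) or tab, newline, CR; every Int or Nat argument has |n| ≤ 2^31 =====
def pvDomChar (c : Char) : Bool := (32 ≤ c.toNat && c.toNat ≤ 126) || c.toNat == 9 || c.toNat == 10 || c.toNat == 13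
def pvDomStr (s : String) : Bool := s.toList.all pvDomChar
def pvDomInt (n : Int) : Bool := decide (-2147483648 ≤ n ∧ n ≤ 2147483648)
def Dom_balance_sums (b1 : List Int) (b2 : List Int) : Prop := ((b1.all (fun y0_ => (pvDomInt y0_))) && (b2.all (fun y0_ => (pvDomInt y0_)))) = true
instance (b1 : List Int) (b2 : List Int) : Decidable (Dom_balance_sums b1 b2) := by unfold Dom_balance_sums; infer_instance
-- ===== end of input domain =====

-- B replaces A's value→indices table with a plain nested scan; return value only
-- (both Pythons also swap the two elements in the argument lists in place).

-- ===== PORT A =====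
-- the loop over enumerate(b1): first a with pos2[a - target] nonempty, swap at (i, j)
-- (i and j are enumerate indices, hence nonnegative and in range: .toNat is exact here)
def balanceLoopA (target : Int) (pos2 : PySem.Dict Int (List Int))
    (b1 b2 : List Int) : List (Int × Int) → List Int × List Int
  | [] => (b1, b2)
  | (i, a) :: rest =>
    let b := a - target
    match pos2.getD b [] with
    | [] => balanceLoopA target pos2 b1 b2 rest
    | j :: _ => (b1.set i.toNat (b2.getD j.toNat 0), b2.set j.toNat a)

def balance_sums (b1 : List Int) (b2 : List Int) : List Int × List Int :=
  let sum1 := b1.sum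
  let sum2 := b2.sum
  let diff := sum1 - sum2
  if PySem.Int.mod diff 2 ≠ 0 then (b1, b2)
  else
    let target := PySem.Int.floordiv diff 2
    let pos2 := (PySem.List.enumerate b2 0).foldl
      (fun d p => d.modify p.2 [] (· ++ [p.1])) PySem.Dict.empty
    balanceLoopA target pos2 b1 b2 (PySem.List.enumerate b1 0)

-- ===== PORT B =====
-- inner scan: first index j of b2 with a - b == target
def findJ (target a : Int) : List Int → Nat → Option Nat
  | [], _ => none
  | b :: rest, j => if a - b == target then some j else findJ target a rest (j + 1)

-- outer scan over b1 with index i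
def balanceLoopB (target : Int) (b1 b2 : List Int) : List Int → Nat → List Int × List Int
  | [], _ => (b1, b2)
  | a :: rest, i =>
    match findJ target a b2 0 with
    | some j => (b1.set i (b2.getD j 0), b2.set j a)
    | none => balanceLoopB target b1 b2 rest (i + 1)

def balance_sums_alt (b1 : List Int) (b2 : List Int) : List Int × List Int :=
  let diff := b1.sum - b2.sum
  if PySem.Int.mod diff 2 ≠ 0 then (b1, b2)
  else balanceLoopB (PySem.Int.floordiv diff 2) b1 b2 b1 0

-- ===== PRECONDITION & SPEC =====
def Spec_balance_sums (b1 : List Int) (b2 : List Int) (out : List Int × List Int) : Prop := out = balance_sums_alt b1 b2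
instance (b1 : List Int) (b2 : List Int) (out : List Int × List Int) : Decidable (Spec_balance_sums b1 b2 out) := by unfold Spec_balance_sums; infer_instance

-- ===== CLAIM (what is proved, stated in full; the proofs are below) =====
def Claim_equal_balance_sums : Prop := ∀ (b1 : List Int) (b2 : List Int), Dom_balance_sums b1 b2 → Spec_balance_sums b1 b2 (balance_sums b1 b2)

-- ===== LEMMAS AND PROOFS =====

-- the defaultdict build: getD of the fold is the accumulator's entry ++ the indices of v
theorem getD_build (l : List (Int × Int)) (d : PySem.Dict Int (List Int)) (v : Int) :
    (l.foldl (fun d p => d.modify p.2 [] (· ++ [p.1])) d).getD v []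
      = d.getD v [] ++ ((l.filter (fun p => p.2 == v)).map (·.1)) := by
  induction l generalizing d with
  | nil => simp
  | cons p rest ih =>
    simp only [List.foldl_cons, List.filter_cons]
    rw [ih]
    by_cases h : p.2 = v
    · subst h
      simp
    · rw [PySem.Dict.getD_modify]
      simp [h, Ne.symm h]

-- findJ computes the head of the indices of (a - target) in the enumeration of l from s
theorem findJ_spec (l : List Int) (s : Nat) (target a : Int) :
    findJ target a l s
      = ((((PySem.List.enumerate l (s : Int)).filter (fun p => p.2 == a - target)).map (·.1)).head?).map Int.toNat := by
  induction l generalizing s with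
  | nil => simp [findJ, PySem.List.enumerate_nil]
  | cons b rest ih =>
    rw [PySem.List.enumerate_cons]
    by_cases h : a - b = target
    · have hb : (b == a - target) = true := by simp; omega
      simp [findJ, h, hb]
    · have hb : (b == a - target) = false := by simp; omega
      have hc : (a - b == target) = false := by simp; omega
      rw [List.filter_cons]
      simp only [findJ, hc, Bool.false_eq_true, if_false, hb]
      have hcast : ((s : Int) + 1) = (((s + 1 : Nat)) : Int) := by push_cast; ring
      rw [hcast, ih]

-- the two loops agree, with pos2 built from b2
theorem loop_eq (target : Int) (b2 : List Int) (rest : List Int) :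
    ∀ (i : Nat) (b1 : List Int),
    balanceLoopA target
      ((PySem.List.enumerate b2 0).foldl (fun d p => d.modify p.2 [] (· ++ [p.1])) PySem.Dict.empty)
      b1 b2 (PySem.List.enumerate rest (i : Int))
      = balanceLoopB target b1 b2 rest i := by
  induction rest with
  | nil => intro i b1; simp [PySem.List.enumerate_nil, balanceLoopA, balanceLoopB]
  | cons a rest ih =>
    intro i b1
    rw [PySem.List.enumerate_cons]
    simp only [balanceLoopA, balanceLoopB]
    have hget := getD_build (PySem.List.enumerate b2 0) PySem.Dict.empty (a - target)
    rw [PySem.Dict.getD_empty] at hget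
    simp only [List.nil_append] at hget
    have hfind := findJ_spec b2 0 target a
    simp only [Nat.cast_zero] at hfind
    rw [hget]
    cases hfl : ((PySem.List.enumerate b2 0).filter (fun p => p.2 == a - target)).map (·.1) with
    | nil =>
      rw [hfl] at hfind
      simp only [List.head?_nil, Option.map_none] at hfind
      rw [hfind]
      have : ((i : Int) + 1) = (((i + 1 : Nat)) : Int) := by push_cast; ring
      rw [this, ih]
    | cons j js =>
      rw [hfl] at hfind
      simp only [List.head?_cons, Option.map_some] at hfind
      rw [hfind]
      simp [Int.toNat_natCast]

-- ===== VERDICT (by name: the statement is the Claim_ definition above) =====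
theorem balance_sums_spec : Claim_equal_balance_sums := by
  intro b1 b2 _
  unfold Spec_balance_sums balance_sums balance_sums_alt
  dsimp only
  split_ifs with h
  · rfl
  · have := loop_eq (PySem.Int.floordiv (b1.sum - b2.sum) 2) b2 b1 0 b1
    simp only [Nat.cast_zero] at this
    exact this
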